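-- pv_equiv track=rewrite | github.com/LevensteinLab/pRNN | prnn/utils/data.py | num_to_indices
-- ===== SOURCE A (Python) =====
-- def num_to_indices(n_trajs):
--     indices_list = []
--     start_index = 0
--     for length in n_trajs:
--         indices = list(range(start_index, start_index + length))
--         indices_list.append(indices)
--         start_index += length
--     return indices_list
-- ===== SOURCE B (Python) =====
-- def num_to_indices(n_trajs):
--     # boundary table first, then one comprehension over adjacent boundary pairs
--     bounds = [0]
--     for length in n_trajs:
--         bounds.append(bounds[-1] + length)
--     return [list(range(a, b)) for a, b in zip(bounds, bounds[1:])]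
-- ===== Notes on version B (the rewrite author's own statement) =====
-- stated objective: alternative
-- what changed: Replaces the running start_index accumulator interleaved with block construction by two separate passes: first a cumulative boundary table, then a comprehension over adjacent boundary pairs producing each ranged block.
import Mathlib
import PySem

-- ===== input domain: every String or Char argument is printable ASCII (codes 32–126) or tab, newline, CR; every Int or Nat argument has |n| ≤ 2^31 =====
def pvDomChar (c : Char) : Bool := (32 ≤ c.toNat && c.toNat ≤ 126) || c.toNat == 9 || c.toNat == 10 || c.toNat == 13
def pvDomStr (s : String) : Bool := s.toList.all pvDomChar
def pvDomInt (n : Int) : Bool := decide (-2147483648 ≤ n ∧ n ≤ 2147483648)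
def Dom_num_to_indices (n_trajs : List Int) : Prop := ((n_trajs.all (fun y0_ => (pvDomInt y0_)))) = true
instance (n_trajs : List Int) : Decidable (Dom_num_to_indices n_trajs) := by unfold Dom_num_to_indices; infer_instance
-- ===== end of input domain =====

-- ===== PORT A =====
-- B builds a boundary table first, then maps adjacent boundary pairs to blocks; A keeps a running start index. Return values proved equal on all inputs.
def num_to_indices (n_trajs : List Int) : List (List Int) :=
  (n_trajs.foldl
    (fun (acc : List (List Int) × Int) length =>
      (acc.1 ++ [PySem.List.pyRange acc.2 (acc.2 + length) 1], acc.2 + length))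
    ([], 0)).1

-- ===== PORT B =====
def num_to_indices_alt (n_trajs : List Int) : List (List Int) :=
  let bounds := n_trajs.foldl (fun bs length => bs ++ [bs.getLastD 0 + length]) [0]
  (bounds.zip (bounds.drop 1)).map (fun p => PySem.List.pyRange p.1 p.2 1)

-- ===== PRECONDITION & SPEC =====
def Spec_num_to_indices (n_trajs : List Int) (out : List (List Int)) : Prop := out = num_to_indices_alt n_trajs
instance (n_trajs : List Int) (out : List (List Int)) : Decidable (Spec_num_to_indices n_trajs out) := by unfold Spec_num_to_indices; infer_instance

-- ===== CLAIM (what is proved, stated in full; the proofs are below) =====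
def Claim_equal_num_to_indices : Prop := ∀ (n_trajs : List Int), Dom_num_to_indices n_trajs → Spec_num_to_indices n_trajs (num_to_indices n_trajs)

-- ===== LEMMAS AND PROOFS =====

-- reference form: blocks s l = the list of consecutive index blocks starting at s
def pvBlocks (s : Int) : List Int → List (List Int)
  | [] => []
  | x :: xs => PySem.List.pyRange s (s + x) 1 :: pvBlocks (s + x) xs

-- cumulative tail of the boundary table starting from s
def pvTB (s : Int) : List Int → List Int
  | [] => []
  | x :: xs => (s + x) :: pvTB (s + x) xs

lemma pvA_fold (l : List Int) : ∀ (acc : List (List Int)) (s : Int),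
    (l.foldl (fun (a : List (List Int) × Int) length =>
        (a.1 ++ [PySem.List.pyRange a.2 (a.2 + length) 1], a.2 + length)) (acc, s)).1
      = acc ++ pvBlocks s l := by
  induction l with
  | nil => intro acc s; simp [pvBlocks]
  | cons x xs ih =>
    intro acc s
    simp only [List.foldl_cons, pvBlocks]
    rw [ih]
    simp

lemma pvB_bounds (l : List Int) : ∀ (bs : List Int) (s : Int), bs.getLastD 0 = s →
    l.foldl (fun bs length => bs ++ [bs.getLastD 0 + length]) bs = bs ++ pvTB s l := by
  induction l with
  | nil => intro bs s _; simp [pvTB]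
  | cons x xs ih =>
    intro bs s hs
    simp only [List.foldl_cons, pvTB]
    rw [hs, ih (bs ++ [s + x]) (s + x) (by simp)]
    simp

lemma pvB_zip (l : List Int) : ∀ (s : Int),
    (((s :: pvTB s l).zip ((s :: pvTB s l).drop 1)).map
        (fun p => PySem.List.pyRange p.1 p.2 1)) = pvBlocks s l := by
  induction l with
  | nil => intro s; simp [pvTB, pvBlocks]
  | cons x xs ih =>
    intro s
    simp only [pvTB, pvBlocks, List.drop, List.zip_cons_cons, List.map_cons]
    exact congrArg _ (ih (s + x))

-- ===== VERDICT (by name: the statement is the Claim_ definition above) =====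
theorem num_to_indices_spec : Claim_equal_num_to_indices := by
  intro n_trajs _
  unfold Spec_num_to_indices num_to_indices num_to_indices_alt
  rw [pvA_fold n_trajs [] 0, pvB_bounds n_trajs [0] 0 (by simp)]
  simpa using (pvB_zip n_trajs 0).symm
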